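-- pv_equiv track=rewrite | github.com/creative-darkstar/sparta-algorithm | 프로그래머스/1/12922. 수박수박수박수박수박수？/수박수박수박수박수박수？.py | solution
-- ===== SOURCE A (Python) =====
-- def solution(n):
--     answer = ''
--     for _ in range(n):
--         if _ % 2 == 0:
--             answer += '수'
--         else:
--             answer += '박'
--     return answer
-- ===== SOURCE B (Python) =====
-- def solution(n):
--     return ('수박' * ((n + 1) // 2))[:n]
-- ===== Notes on version B (the rewrite author's own statement) =====
-- stated objective: idiomatic
-- what changed: Replaces the per-index loop with parity branch and string accumulator by a single expression: repeat the two-character unit enough times and slice to length n.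
import Mathlib
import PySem

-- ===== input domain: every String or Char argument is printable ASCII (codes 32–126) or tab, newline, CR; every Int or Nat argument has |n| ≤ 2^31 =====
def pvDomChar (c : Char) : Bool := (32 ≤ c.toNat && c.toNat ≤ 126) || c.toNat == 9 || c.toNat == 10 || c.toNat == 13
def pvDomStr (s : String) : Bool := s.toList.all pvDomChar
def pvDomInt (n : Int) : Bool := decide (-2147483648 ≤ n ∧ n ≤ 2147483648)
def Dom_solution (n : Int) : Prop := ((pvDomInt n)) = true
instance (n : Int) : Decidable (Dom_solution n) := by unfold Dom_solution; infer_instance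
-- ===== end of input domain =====

-- B replaces A's per-index loop (parity branch + string accumulator) by repeat-and-slice: '수박' * ((n+1)//2) trimmed to length n.


-- ===== PORT A =====
def solution (n : Int) : String :=
  (PySem.List.pyRange 0 n 1).foldl
    (fun answer i => if PySem.Int.mod i 2 = 0 then answer ++ "수" else answer ++ "박") ""

-- ===== PORT B =====
def solution_alt (n : Int) : String :=
  String.ofList
    (PySem.List.slice (PySem.List.pyRepeat "수박".toList (PySem.Int.floordiv (n + 1) 2)) none (some n))

-- ===== PRECONDITION & SPEC =====
def Spec_solution (n : Int) (out : String) : Prop := out = solution_alt n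
instance (n : Int) (out : String) : Decidable (Spec_solution n out) := by unfold Spec_solution; infer_instance

-- ===== CLAIM (what is proved, stated in full; the proofs are below) =====
def Claim_equal_solution : Prop := ∀ (n : Int), Dom_solution n → Spec_solution n (solution n)

-- ===== LEMMAS AND PROOFS =====

-- the k-th character of the alternating string
def pvAltChar (k : Nat) : Char := if k % 2 = 0 then '수' else '박'

-- A's loop over range(m) builds exactly the alternating characters 0..m-1
theorem pvA_chars (m : Nat) :
    (solution (m : Int)).toList = (List.range m).map pvAltChar := by
  induction m with
  | zero => simp [solution, PySem.List.pyRange_one_eq_nil]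
  | succ m ih =>
      unfold solution at ih ⊢
      rw [show ((m + 1 : Nat) : Int) = (m : Int) + 1 by push_cast; ring,
        PySem.List.pyRange_one_succ_right (by exact_mod_cast Nat.zero_le m),
        List.foldl_append, List.range_succ, List.map_append]
      simp only [List.foldl]
      by_cases h : m % 2 = 0
      · have hm : PySem.Int.mod (m : Int) 2 = 0 := by
          simp only [PySem.Int.mod, Int.fmod_eq_emod]; omega
        rw [if_pos hm, String.toList_append, ih]
        simp [pvAltChar, h]
      · have hm : ¬ PySem.Int.mod (m : Int) 2 = 0 := by
          simp only [PySem.Int.mod, Int.fmod_eq_emod]; omega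
        rw [if_neg hm, String.toList_append, ih]
        simp [pvAltChar, h]
  
-- '수박' repeated k times is the alternating characters 0..2k-1
theorem pvRep_chars (k : Nat) :
    (List.replicate k "수박".toList).flatten = (List.range (2 * k)).map pvAltChar := by
  induction k with
  | zero => simp
  | succ k ih =>
      rw [List.replicate_succ', List.flatten_append, ih,
        show 2 * (k + 1) = (2 * k + 1) + 1 by ring, List.range_succ, List.range_succ,
        List.map_append, List.map_append]
      have h0 : pvAltChar (2 * k) = '수' := by simp [pvAltChar, Nat.mul_mod_right]
      have h1 : pvAltChar (2 * k + 1) = '박' := by simp [pvAltChar]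
      have hsb : "수박".toList = ['수', '박'] := rfl
      simp [hsb, h0, h1]

theorem pvB_chars (m : Nat) :
    (solution_alt (m : Int)).toList = (List.range m).map pvAltChar := by
  have hfd : PySem.Int.floordiv ((m : Int) + 1) 2 = (((m + 1) / 2 : Nat) : Int) := by
    simp [PySem.Int.floordiv, Int.fdiv_eq_ediv]
  unfold solution_alt PySem.List.pyRepeat
  rw [hfd, PySem.List.slice_to_natCast]
  simp only [Int.toNat_natCast, String.toList_ofList, pvRep_chars, ← List.map_take,
    List.take_range]
  have hmin : min m (2 * ((m + 1) / 2)) = m := by omega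
  rw [hmin]

theorem pvNeg (n : Int) (hn : n < 0) : solution n = solution_alt n := by
  have h1 : PySem.List.pyRange 0 n 1 = [] := PySem.List.pyRange_one_eq_nil (le_of_lt hn)
  simp [solution, solution_alt, h1, PySem.List.pyRepeat, PySem.List.slice]
  exact Or.inr (by omega)

-- ===== VERDICT (by name: the statement is the Claim_ definition above) =====
theorem solution_spec : Claim_equal_solution := by
  intro n _
  unfold Spec_solution
  rcases lt_or_ge n 0 with hn | hn
  · exact pvNeg n hn
  · obtain ⟨m, rfl⟩ := Int.eq_ofNat_of_zero_le hn
    rw [← String.toList_inj, pvA_chars, pvB_chars]
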